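-- pv_equiv track=rewrite | github.com/Neksi11/Vector-Base-Model | rag_agent/query_processor.py | _basic_spell_correction
-- ===== SOURCE A (Python) =====
-- def _basic_spell_correction(text: str) -> str:
--     """Apply basic spell corrections."""
--     corrections = {
--         'machien': 'machine',
--         'learing': 'learning',
--         'algoritm': 'algorithm',
--         'classifcation': 'classification',
--         'prediciton': 'prediction',
--         'anaylsis': 'analysis'
--     }
--
--     for wrong, correct in corrections.items():
--         text = text.replace(wrong, correct)
--
--     return text
-- ===== SOURCE B (Python) =====
-- def _basic_spell_correction(text: str) -> str:
--     """Apply basic spell corrections in a single left-to-right pass."""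
--     corrections = {
--         'machien': 'machine',
--         'learing': 'learning',
--         'algoritm': 'algorithm',
--         'classifcation': 'classification',
--         'prediciton': 'prediction',
--         'anaylsis': 'analysis'
--     }
--
--     out = []
--     i = 0
--     n = len(text)
--     while i < n:
--         for wrong, correct in corrections.items():
--             if text.startswith(wrong, i):
--                 out.append(correct)
--                 i += len(wrong)
--                 break
--         else:
--             out.append(text[i])
--             i += 1
--     return ''.join(out)
-- ===== Notes on version B (the rewrite author's own statement) =====
-- stated objective: alternative
-- what changed: Replaces six sequential full-text replace passes by one left-to-right scan that at each position tries the correction keys and emits the replacement of the first match (the semantics of re.sub on the alternation of the keys).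
-- outside the precondition, e.g. on _basic_spell_correction('algoritmachien'): A returns 'algorithmachine', B returns 'algorithmachien'
import Mathlib
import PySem

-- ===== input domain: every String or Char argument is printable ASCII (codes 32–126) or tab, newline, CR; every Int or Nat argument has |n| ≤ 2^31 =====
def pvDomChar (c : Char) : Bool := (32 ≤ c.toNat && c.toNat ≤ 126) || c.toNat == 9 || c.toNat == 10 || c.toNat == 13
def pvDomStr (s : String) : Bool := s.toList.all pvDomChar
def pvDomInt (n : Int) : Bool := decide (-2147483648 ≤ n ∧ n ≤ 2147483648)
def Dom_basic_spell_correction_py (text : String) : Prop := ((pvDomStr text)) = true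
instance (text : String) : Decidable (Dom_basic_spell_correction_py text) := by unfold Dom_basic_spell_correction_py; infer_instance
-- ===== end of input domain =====

-- B replaces A's six sequential full-text replace passes by one left-to-right scan that at each
-- position emits the correction of the first matching key (alternative decomposition, same cost class).

-- ===== PORT A =====
-- literal transliteration: the dict is iterated in insertion order, text = text.replace(wrong, correct)
def basic_spell_correction_py (text : String) : String :=
  let t1 := PySem.Str.replace text "machien" "machine"
  let t2 := PySem.Str.replace t1 "learing" "learning"
  let t3 := PySem.Str.replace t2 "algoritm" "algorithm"
  let t4 := PySem.Str.replace t3 "classifcation" "classification"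
  let t5 := PySem.Str.replace t4 "prediciton" "prediction"
  let t6 := PySem.Str.replace t5 "anaylsis" "analysis"
  t6

-- ===== PORT B =====
-- the six (wrong, correct) pairs of Source B, as char lists, in dict order
def k1l : List Char := ['m','a','c','h','i','e','n']
def v1l : List Char := ['m','a','c','h','i','n','e']
def k2l : List Char := ['l','e','a','r','i','n','g']
def v2l : List Char := ['l','e','a','r','n','i','n','g']
def k3l : List Char := ['a','l','g','o','r','i','t','m']
def v3l : List Char := ['a','l','g','o','r','i','t','h','m']
def k4l : List Char := ['c','l','a','s','s','i','f','c','a','t','i','o','n']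
def v4l : List Char := ['c','l','a','s','s','i','f','i','c','a','t','i','o','n']
def k5l : List Char := ['p','r','e','d','i','c','i','t','o','n']
def v5l : List Char := ['p','r','e','d','i','c','t','i','o','n']
def k6l : List Char := ['a','n','a','y','l','s','i','s']
def v6l : List Char := ['a','n','a','l','y','s','i','s']

-- Source B's while-loop: at each position try the keys in dict order (Source B's 6-entry inner for-loop
-- unrolled), emit the correction of the first match and jump over it, otherwise copy one character
def scanB : List Char → List Char
  | [] => []
  | c :: t =>
    if k1l <+: (c :: t) then v1l ++ scanB ((c :: t).drop k1l.length)
    else if k2l <+: (c :: t) then v2l ++ scanB ((c :: t).drop k2l.length)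
    else if k3l <+: (c :: t) then v3l ++ scanB ((c :: t).drop k3l.length)
    else if k4l <+: (c :: t) then v4l ++ scanB ((c :: t).drop k4l.length)
    else if k5l <+: (c :: t) then v5l ++ scanB ((c :: t).drop k5l.length)
    else if k6l <+: (c :: t) then v6l ++ scanB ((c :: t).drop k6l.length)
    else c :: scanB t
  termination_by s => s.length
  decreasing_by all_goals simp [k1l, k2l, k3l, k4l, k5l, k6l]

def basic_spell_correction_py_alt (text : String) : String :=
  String.ofList (scanB text.toList)

-- ===== PRECONDITION & SPEC =====
-- Pre_ excludes texts containing the overlapping typo run 'algoritmachien', the one corner where A's six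
-- sequential substring passes and B's single left-to-right first-match pass legitimately diverge — each
-- is a defensible reading of such an overlap.
def Pre_basic_spell_correction_py (text : String) : Prop :=
  PySem.Str.isIn "algoritmachien" text = false
instance (text : String) : Decidable (Pre_basic_spell_correction_py text) := by
  unfold Pre_basic_spell_correction_py; infer_instance

def pvWitness_basic_spell_correction_py : String := "a machien for learing an algoritm"

def Spec_basic_spell_correction_py (text : String) (out : String) : Prop :=
  out = basic_spell_correction_py_alt text
instance (text : String) (out : String) : Decidable (Spec_basic_spell_correction_py text out) := by
  unfold Spec_basic_spell_correction_py; infer_instance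

-- ===== CLAIM (what is proved, stated in full; the proofs are below) =====
def Claim_equal_basic_spell_correction_py : Prop :=
  ∀ (text : String), Dom_basic_spell_correction_py text → Pre_basic_spell_correction_py text →
    Spec_basic_spell_correction_py text (basic_spell_correction_py text)

-- ===== LEMMAS AND PROOFS =====

def badl : List Char := ['a','l','g','o','r','i','t','m','a','c','h','i','e','n']

theorem prefix_or_of_prefix_append {x a z : List Char} (h : x <+: a ++ z) :
    x <+: a ∨ a <+: x :=
  List.prefix_or_prefix_of_prefix h (List.prefix_append a z)

theorem not_prefix_append {k a : List Char} (h : ¬ (k.take a.length <+: a)) (X : List Char) :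
    ¬ k <+: (a ++ X) := by
  intro hk
  rcases prefix_or_of_prefix_append hk with h1 | h1
  · exact h ((List.take_prefix _ _).trans h1)
  · obtain ⟨r, hr⟩ := h1
    apply h
    rw [← hr, List.take_left]

-- Python's str.replace(old, new) for nonempty old, written as plain structural recursion
def rep (old new : List Char) : List Char → List Char
  | [] => []
  | c :: t =>
    if h : old ≠ [] ∧ old <+: (c :: t) then new ++ rep old new ((c :: t).drop old.length)
    else c :: rep old new t
  termination_by s => s.length
  decreasing_by
  · have : 1 ≤ old.length := by
      cases old with
      | nil => exact absurd rfl h.1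
      | cons _ _ => simp
    simp; omega
  · simp

theorem rep_front (k v X : List Char) (hk : k ≠ []) :
    rep k v (k ++ X) = v ++ rep k v X := by
  cases k with
  | nil => exact absurd rfl hk
  | cons c t =>
    rw [show (c :: t) ++ X = c :: (t ++ X) from rfl, rep]
    rw [dif_pos ⟨hk, by exact List.prefix_append _ _⟩]
    congr 1
    rw [show c :: (t ++ X) = (c :: t) ++ X from rfl, List.drop_left]

theorem rep_append (k v : List Char) :
    ∀ (a X : List Char), (∀ j, j < a.length → ¬ k <+: (a.drop j ++ X)) →
      rep k v (a ++ X) = a ++ rep k v X := by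
  intro a
  induction a with
  | nil => intro X _; rfl
  | cons c a' ih =>
    intro X h
    have h0 : ¬ k <+: ((c :: a') ++ X) := by simpa using h 0 (by simp)
    rw [show (c :: a') ++ X = c :: (a' ++ X) from rfl, rep]
    rw [dif_neg (by rintro ⟨-, hp⟩; exact h0 hp)]
    rw [ih X (fun j hj => by simpa using h (j+1) (by simpa using hj))]
    rfl

theorem go_eq_rep (old new : List Char) (hold : old ≠ []) :
    ∀ fuel l acc, l.length ≤ fuel →
      PySem.Chars.replace.go old new fuel l acc = acc.reverse ++ rep old new l := by
  intro fuel
  induction fuel with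
  | zero =>
    intro l acc hl
    have : l = [] := by
      cases l with
      | nil => rfl
      | cons c t => simp at hl
    subst this
    simp [PySem.Chars.replace.go, rep]
  | succ n ih =>
    intro l acc hl
    cases l with
    | nil => simp [PySem.Chars.replace.go, rep]
    | cons c t =>
      rw [PySem.Chars.replace.go]
      by_cases hp : old <+: (c :: t)
      · have hpb : old.isPrefixOf (c :: t) = true := List.isPrefixOf_iff_prefix.mpr hp
        rw [if_pos hpb]
        have hlen : 1 ≤ old.length := by
          cases old with
          | nil => exact absurd rfl hold
          | cons _ _ => simp
        have hdl : ((c :: t).drop old.length).length ≤ n := by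
          simp at hl ⊢; omega
        rw [ih _ _ hdl]
        rw [rep, dif_pos ⟨hold, hp⟩]
        simp
      · have hpb : old.isPrefixOf (c :: t) = false := by
          rw [Bool.eq_false_iff]
          intro hc
          exact hp (List.isPrefixOf_iff_prefix.mp hc)
        rw [if_neg (by simp [hpb])]
        have : t.length ≤ n := by simp at hl; omega
        rw [ih _ _ this]
        rw [rep, dif_neg (by rintro ⟨-, hc⟩; exact hp hc)]
        simp

theorem replace_eq_rep (s old new : List Char) (h : old ≠ []) :
    PySem.Chars.replace s old new = rep old new s := by
  rw [PySem.Chars.replace, if_neg (by simpa using h)]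
  simpa using go_eq_rep old new h s.length s [] le_rfl

-- an earlier replacement pass cannot create a fresh match in front of it: if every tail of w is
-- incompatible with the substituted value v' (or matches v' only where it also matches the key k'),
-- then a w-prefix of the replaced string was already a w-prefix of the original
theorem rep_front_pres (k' v' : List Char) :
    ∀ n (u w : List Char), u.length ≤ n →
      (∀ m, m < w.length → ¬ v' <+: (w.drop m) ∧ ((w.drop m) <+: v' → (w.drop m) <+: k')) →
      w <+: rep k' v' u → w <+: u := by
  intro n
  induction n with
  | zero =>
    intro u w hu _ hw
    have : u = [] := by cases u with | nil => rfl | cons c t => simp at hu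
    subst this
    simpa [rep] using hw
  | succ n ih =>
    intro u w hu hcomp hw
    cases u with
    | nil => simpa [rep] using hw
    | cons c t =>
      by_cases hg : k' ≠ [] ∧ k' <+: (c :: t)
      · rw [rep, dif_pos hg] at hw
        cases w with
        | nil => exact List.nil_prefix
        | cons x w' =>
          rcases prefix_or_of_prefix_append hw with h1 | h1
          · exact ((hcomp 0 (by simp)).2 (by simpa using h1)).trans hg.2
          · exact absurd (by simpa using h1) (hcomp 0 (by simp)).1
      · rw [rep, dif_neg hg] at hw
        cases w with
        | nil => exact List.nil_prefix
        | cons x w' =>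
          rcases List.cons_prefix_cons.mp hw with ⟨rfl, hw'⟩
          have ht : t.length ≤ n := by simp at hu; omega
          have : w' <+: t :=
            ih t w' ht (fun m hm => by simpa using hcomp (m+1) (by simpa using hm)) hw'
          exact List.cons_prefix_cons.mpr ⟨rfl, this⟩

theorem pass (k v a : List Char)
    (h : ∀ j, j < a.length → ¬ (k.take ((a.drop j).length) <+: a.drop j)) (X : List Char) :
    rep k v (a ++ X) = a ++ rep k v X :=
  rep_append k v a X (fun j hj => not_prefix_append (h j hj) X)

theorem rep_cons_neg (k v : List Char) (c : Char) (Z : List Char) (h : ¬ k <+: c :: Z) :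
    rep k v (c :: Z) = c :: rep k v Z := by
  rw [rep, dif_neg (by rintro ⟨-, hp⟩; exact h hp)]

theorem infix_of_infix_suffix {b a s : List Char} (h : b <:+: a) (hs : a <:+ s) : b <:+: s :=
  h.trans hs.isInfix

theorem scanB_k1 (X : List Char) : scanB (k1l ++ X) = v1l ++ scanB X := by
  have h : k1l ++ X = 'm' :: (['a','c','h','i','e','n'] ++ X) := rfl
  rw [h, scanB, if_pos (show k1l <+: 'm' :: (['a','c','h','i','e','n'] ++ X) from List.prefix_append _ _)]
  simp [k1l]

theorem scanB_k2 (X : List Char) : scanB (k2l ++ X) = v2l ++ scanB X := by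
  have h : k2l ++ X = 'l' :: (['e','a','r','i','n','g'] ++ X) := rfl
  rw [h, scanB,
      if_neg (show ¬ k1l <+: 'l' :: (['e','a','r','i','n','g'] ++ X) from by
        rw [← h]; exact not_prefix_append (by decide) X),
      if_pos (show k2l <+: 'l' :: (['e','a','r','i','n','g'] ++ X) from by rw [← h]; exact List.prefix_append _ _)]
  simp [k2l]

theorem scanB_k3 (X : List Char) : scanB (k3l ++ X) = v3l ++ scanB X := by
  have h : k3l ++ X = 'a' :: (['l','g','o','r','i','t','m'] ++ X) := rfl
  rw [h, scanB,
      if_neg (show ¬ k1l <+: 'a' :: (['l','g','o','r','i','t','m'] ++ X) from by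
        rw [← h]; exact not_prefix_append (by decide) X),
      if_neg (show ¬ k2l <+: 'a' :: (['l','g','o','r','i','t','m'] ++ X) from by
        rw [← h]; exact not_prefix_append (by decide) X),
      if_pos (show k3l <+: 'a' :: (['l','g','o','r','i','t','m'] ++ X) from by rw [← h]; exact List.prefix_append _ _)]
  simp [k3l]

theorem scanB_k4 (X : List Char) : scanB (k4l ++ X) = v4l ++ scanB X := by
  have h : k4l ++ X = 'c' :: (['l','a','s','s','i','f','c','a','t','i','o','n'] ++ X) := rfl
  rw [h, scanB,
      if_neg (show ¬ k1l <+: 'c' :: (['l','a','s','s','i','f','c','a','t','i','o','n'] ++ X) from by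
        rw [← h]; exact not_prefix_append (by decide) X),
      if_neg (show ¬ k2l <+: 'c' :: (['l','a','s','s','i','f','c','a','t','i','o','n'] ++ X) from by
        rw [← h]; exact not_prefix_append (by decide) X),
      if_neg (show ¬ k3l <+: 'c' :: (['l','a','s','s','i','f','c','a','t','i','o','n'] ++ X) from by
        rw [← h]; exact not_prefix_append (by decide) X),
      if_pos (show k4l <+: 'c' :: (['l','a','s','s','i','f','c','a','t','i','o','n'] ++ X) from by rw [← h]; exact List.prefix_append _ _)]
  simp [k4l]

theorem scanB_k5 (X : List Char) : scanB (k5l ++ X) = v5l ++ scanB X := by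
  have h : k5l ++ X = 'p' :: (['r','e','d','i','c','i','t','o','n'] ++ X) := rfl
  rw [h, scanB,
      if_neg (show ¬ k1l <+: 'p' :: (['r','e','d','i','c','i','t','o','n'] ++ X) from by
        rw [← h]; exact not_prefix_append (by decide) X),
      if_neg (show ¬ k2l <+: 'p' :: (['r','e','d','i','c','i','t','o','n'] ++ X) from by
        rw [← h]; exact not_prefix_append (by decide) X),
      if_neg (show ¬ k3l <+: 'p' :: (['r','e','d','i','c','i','t','o','n'] ++ X) from by
        rw [← h]; exact not_prefix_append (by decide) X),
      if_neg (show ¬ k4l <+: 'p' :: (['r','e','d','i','c','i','t','o','n'] ++ X) from by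
        rw [← h]; exact not_prefix_append (by decide) X),
      if_pos (show k5l <+: 'p' :: (['r','e','d','i','c','i','t','o','n'] ++ X) from by rw [← h]; exact List.prefix_append _ _)]
  simp [k5l]

theorem scanB_k6 (X : List Char) : scanB (k6l ++ X) = v6l ++ scanB X := by
  have h : k6l ++ X = 'a' :: (['n','a','y','l','s','i','s'] ++ X) := rfl
  rw [h, scanB,
      if_neg (show ¬ k1l <+: 'a' :: (['n','a','y','l','s','i','s'] ++ X) from by
        rw [← h]; exact not_prefix_append (by decide) X),
      if_neg (show ¬ k2l <+: 'a' :: (['n','a','y','l','s','i','s'] ++ X) from by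
        rw [← h]; exact not_prefix_append (by decide) X),
      if_neg (show ¬ k3l <+: 'a' :: (['n','a','y','l','s','i','s'] ++ X) from by
        rw [← h]; exact not_prefix_append (by decide) X),
      if_neg (show ¬ k4l <+: 'a' :: (['n','a','y','l','s','i','s'] ++ X) from by
        rw [← h]; exact not_prefix_append (by decide) X),
      if_neg (show ¬ k5l <+: 'a' :: (['n','a','y','l','s','i','s'] ++ X) from by
        rw [← h]; exact not_prefix_append (by decide) X),
      if_pos (show k6l <+: 'a' :: (['n','a','y','l','s','i','s'] ++ X) from by rw [← h]; exact List.prefix_append _ _)]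
  simp [k6l]

theorem scanB_char (c : Char) (t : List Char)
    (h1 : ¬ k1l <+: c :: t) (h2 : ¬ k2l <+: c :: t) (h3 : ¬ k3l <+: c :: t)
    (h4 : ¬ k4l <+: c :: t) (h5 : ¬ k5l <+: c :: t) (h6 : ¬ k6l <+: c :: t) :
    scanB (c :: t) = c :: scanB t := by
  rw [scanB, if_neg h1, if_neg h2, if_neg h3, if_neg h4, if_neg h5, if_neg h6]

-- the heart: on texts not containing 'algoritmachien', the six sequential passes equal the single scan
theorem main_eq : ∀ n (s : List Char), s.length ≤ n → ¬ (badl <:+: s) →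
    rep k6l v6l (rep k5l v5l (rep k4l v4l (rep k3l v3l (rep k2l v2l (rep k1l v1l s))))) = scanB s := by
  intro n
  induction n with
  | zero =>
    intro s hs _
    have : s = [] := by cases s with | nil => rfl | cons c t => simp at hs
    subst this; simp [rep, scanB]
  | succ n ih =>
    intro s hs hbad
    by_cases hp1 : k1l <+: s
    · obtain ⟨X, rfl⟩ := hp1
      have hX : X.length ≤ n := by simp [k1l] at hs; omega
      have hbadX : ¬ badl <:+: X := fun hb => hbad (infix_of_infix_suffix hb (List.suffix_append _ _))
      rw [rep_front k1l v1l (X) (by decide)]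
      rw [pass k2l v2l v1l (by decide) (rep k1l v1l (X))]
      rw [pass k3l v3l v1l (by decide) (rep k2l v2l (rep k1l v1l (X)))]
      rw [pass k4l v4l v1l (by decide) (rep k3l v3l (rep k2l v2l (rep k1l v1l (X))))]
      rw [pass k5l v5l v1l (by decide) (rep k4l v4l (rep k3l v3l (rep k2l v2l (rep k1l v1l (X)))))]
      rw [pass k6l v6l v1l (by decide) (rep k5l v5l (rep k4l v4l (rep k3l v3l (rep k2l v2l (rep k1l v1l (X))))))]
      rw [ih X hX hbadX, scanB_k1]
    by_cases hp2 : k2l <+: s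
    · obtain ⟨X, rfl⟩ := hp2
      have hX : X.length ≤ n := by simp [k2l] at hs; omega
      have hbadX : ¬ badl <:+: X := fun hb => hbad (infix_of_infix_suffix hb (List.suffix_append _ _))
      rw [pass k1l v1l k2l (by decide) (X)]
      rw [rep_front k2l v2l (rep k1l v1l (X)) (by decide)]
      rw [pass k3l v3l v2l (by decide) (rep k2l v2l (rep k1l v1l (X)))]
      rw [pass k4l v4l v2l (by decide) (rep k3l v3l (rep k2l v2l (rep k1l v1l (X))))]
      rw [pass k5l v5l v2l (by decide) (rep k4l v4l (rep k3l v3l (rep k2l v2l (rep k1l v1l (X)))))]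
      rw [pass k6l v6l v2l (by decide) (rep k5l v5l (rep k4l v4l (rep k3l v3l (rep k2l v2l (rep k1l v1l (X))))))]
      rw [ih X hX hbadX, scanB_k2]
    by_cases hp3 : k3l <+: s
    · obtain ⟨X, rfl⟩ := hp3
      have hX : X.length ≤ n := by simp [k3l] at hs; omega
      have hbadX : ¬ badl <:+: X := fun hb => hbad (infix_of_infix_suffix hb (List.suffix_append _ _))
      have hm : ¬ k1l <+: (k3l.drop 7 ++ X) := by
        intro hc
        rw [show k3l.drop 7 ++ X = 'm' :: X from rfl,
            show k1l = 'm' :: ['a','c','h','i','e','n'] from rfl] at hc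
        rcases List.cons_prefix_cons.mp hc with ⟨-, hc'⟩
        obtain ⟨X', rfl⟩ := hc'
        exact hbad (show badl <+: k3l ++ (['a','c','h','i','e','n'] ++ X') from ⟨X', rfl⟩).isInfix
      rw [rep_append k1l v1l k3l X (by
        intro j hj
        have hj8 : j < 8 := by simpa [k3l] using hj
        interval_cases j <;> first | exact hm | exact not_prefix_append (by decide) X)]
      rw [pass k2l v2l k3l (by decide) (rep k1l v1l (X))]
      rw [rep_front k3l v3l (rep k2l v2l (rep k1l v1l (X))) (by decide)]
      rw [pass k4l v4l v3l (by decide) (rep k3l v3l (rep k2l v2l (rep k1l v1l (X))))]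
      rw [pass k5l v5l v3l (by decide) (rep k4l v4l (rep k3l v3l (rep k2l v2l (rep k1l v1l (X)))))]
      rw [pass k6l v6l v3l (by decide) (rep k5l v5l (rep k4l v4l (rep k3l v3l (rep k2l v2l (rep k1l v1l (X))))))]
      rw [ih X hX hbadX, scanB_k3]
    by_cases hp4 : k4l <+: s
    · obtain ⟨X, rfl⟩ := hp4
      have hX : X.length ≤ n := by simp [k4l] at hs; omega
      have hbadX : ¬ badl <:+: X := fun hb => hbad (infix_of_infix_suffix hb (List.suffix_append _ _))
      rw [pass k1l v1l k4l (by decide) (X)]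
      rw [pass k2l v2l k4l (by decide) (rep k1l v1l (X))]
      rw [pass k3l v3l k4l (by decide) (rep k2l v2l (rep k1l v1l (X)))]
      rw [rep_front k4l v4l (rep k3l v3l (rep k2l v2l (rep k1l v1l (X)))) (by decide)]
      rw [pass k5l v5l v4l (by decide) (rep k4l v4l (rep k3l v3l (rep k2l v2l (rep k1l v1l (X)))))]
      rw [pass k6l v6l v4l (by decide) (rep k5l v5l (rep k4l v4l (rep k3l v3l (rep k2l v2l (rep k1l v1l (X))))))]
      rw [ih X hX hbadX, scanB_k4]
    by_cases hp5 : k5l <+: s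
    · obtain ⟨X, rfl⟩ := hp5
      have hX : X.length ≤ n := by simp [k5l] at hs; omega
      have hbadX : ¬ badl <:+: X := fun hb => hbad (infix_of_infix_suffix hb (List.suffix_append _ _))
      rw [pass k1l v1l k5l (by decide) (X)]
      rw [pass k2l v2l k5l (by decide) (rep k1l v1l (X))]
      rw [pass k3l v3l k5l (by decide) (rep k2l v2l (rep k1l v1l (X)))]
      rw [pass k4l v4l k5l (by decide) (rep k3l v3l (rep k2l v2l (rep k1l v1l (X))))]
      rw [rep_front k5l v5l (rep k4l v4l (rep k3l v3l (rep k2l v2l (rep k1l v1l (X))))) (by decide)]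
      rw [pass k6l v6l v5l (by decide) (rep k5l v5l (rep k4l v4l (rep k3l v3l (rep k2l v2l (rep k1l v1l (X))))))]
      rw [ih X hX hbadX, scanB_k5]
    by_cases hp6 : k6l <+: s
    · obtain ⟨X, rfl⟩ := hp6
      have hX : X.length ≤ n := by simp [k6l] at hs; omega
      have hbadX : ¬ badl <:+: X := fun hb => hbad (infix_of_infix_suffix hb (List.suffix_append _ _))
      rw [pass k1l v1l k6l (by decide) (X)]
      rw [pass k2l v2l k6l (by decide) (rep k1l v1l (X))]
      rw [pass k3l v3l k6l (by decide) (rep k2l v2l (rep k1l v1l (X)))]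
      rw [pass k4l v4l k6l (by decide) (rep k3l v3l (rep k2l v2l (rep k1l v1l (X))))]
      rw [pass k5l v5l k6l (by decide) (rep k4l v4l (rep k3l v3l (rep k2l v2l (rep k1l v1l (X)))))]
      rw [rep_front k6l v6l (rep k5l v5l (rep k4l v4l (rep k3l v3l (rep k2l v2l (rep k1l v1l (X)))))) (by decide)]
      rw [ih X hX hbadX, scanB_k6]
    · cases s with
      | nil => simp [rep, scanB]
      | cons c t =>
        have ht : t.length ≤ n := by simp at hs; omega
        have hbadt : ¬ badl <:+: t := fun hb => hbad (infix_of_infix_suffix hb (List.suffix_cons c t))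
        have n2 : ¬ k2l <+: c :: (rep k1l v1l (t)) := by
          intro hc
          rw [show k2l = 'l' :: ['e','a','r','i','n','g'] from rfl] at hc
          rcases List.cons_prefix_cons.mp hc with ⟨hEq, hw⟩
          have hw := rep_front_pres k1l v1l _ _ ['e','a','r','i','n','g'] le_rfl (by decide) hw
          exact hp2 (by rw [show k2l = 'l' :: ['e','a','r','i','n','g'] from rfl]; exact List.cons_prefix_cons.mpr ⟨hEq, hw⟩)
        have n3 : ¬ k3l <+: c :: (rep k2l v2l (rep k1l v1l (t))) := by
          intro hc
          rw [show k3l = 'a' :: ['l','g','o','r','i','t','m'] from rfl] at hc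
          rcases List.cons_prefix_cons.mp hc with ⟨hEq, hw⟩
          have hw := rep_front_pres k2l v2l _ _ ['l','g','o','r','i','t','m'] le_rfl (by decide) hw
          have hw := rep_front_pres k1l v1l _ _ ['l','g','o','r','i','t','m'] le_rfl (by decide) hw
          exact hp3 (by rw [show k3l = 'a' :: ['l','g','o','r','i','t','m'] from rfl]; exact List.cons_prefix_cons.mpr ⟨hEq, hw⟩)
        have n4 : ¬ k4l <+: c :: (rep k3l v3l (rep k2l v2l (rep k1l v1l (t)))) := by
          intro hc
          rw [show k4l = 'c' :: ['l','a','s','s','i','f','c','a','t','i','o','n'] from rfl] at hc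
          rcases List.cons_prefix_cons.mp hc with ⟨hEq, hw⟩
          have hw := rep_front_pres k3l v3l _ _ ['l','a','s','s','i','f','c','a','t','i','o','n'] le_rfl (by decide) hw
          have hw := rep_front_pres k2l v2l _ _ ['l','a','s','s','i','f','c','a','t','i','o','n'] le_rfl (by decide) hw
          have hw := rep_front_pres k1l v1l _ _ ['l','a','s','s','i','f','c','a','t','i','o','n'] le_rfl (by decide) hw
          exact hp4 (by rw [show k4l = 'c' :: ['l','a','s','s','i','f','c','a','t','i','o','n'] from rfl]; exact List.cons_prefix_cons.mpr ⟨hEq, hw⟩)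
        have n5 : ¬ k5l <+: c :: (rep k4l v4l (rep k3l v3l (rep k2l v2l (rep k1l v1l (t))))) := by
          intro hc
          rw [show k5l = 'p' :: ['r','e','d','i','c','i','t','o','n'] from rfl] at hc
          rcases List.cons_prefix_cons.mp hc with ⟨hEq, hw⟩
          have hw := rep_front_pres k4l v4l _ _ ['r','e','d','i','c','i','t','o','n'] le_rfl (by decide) hw
          have hw := rep_front_pres k3l v3l _ _ ['r','e','d','i','c','i','t','o','n'] le_rfl (by decide) hw
          have hw := rep_front_pres k2l v2l _ _ ['r','e','d','i','c','i','t','o','n'] le_rfl (by decide) hw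
          have hw := rep_front_pres k1l v1l _ _ ['r','e','d','i','c','i','t','o','n'] le_rfl (by decide) hw
          exact hp5 (by rw [show k5l = 'p' :: ['r','e','d','i','c','i','t','o','n'] from rfl]; exact List.cons_prefix_cons.mpr ⟨hEq, hw⟩)
        have n6 : ¬ k6l <+: c :: (rep k5l v5l (rep k4l v4l (rep k3l v3l (rep k2l v2l (rep k1l v1l (t)))))) := by
          intro hc
          rw [show k6l = 'a' :: ['n','a','y','l','s','i','s'] from rfl] at hc
          rcases List.cons_prefix_cons.mp hc with ⟨hEq, hw⟩
          have hw := rep_front_pres k5l v5l _ _ ['n','a','y','l','s','i','s'] le_rfl (by decide) hw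
          have hw := rep_front_pres k4l v4l _ _ ['n','a','y','l','s','i','s'] le_rfl (by decide) hw
          have hw := rep_front_pres k3l v3l _ _ ['n','a','y','l','s','i','s'] le_rfl (by decide) hw
          have hw := rep_front_pres k2l v2l _ _ ['n','a','y','l','s','i','s'] le_rfl (by decide) hw
          have hw := rep_front_pres k1l v1l _ _ ['n','a','y','l','s','i','s'] le_rfl (by decide) hw
          exact hp6 (by rw [show k6l = 'a' :: ['n','a','y','l','s','i','s'] from rfl]; exact List.cons_prefix_cons.mpr ⟨hEq, hw⟩)
        rw [rep_cons_neg k1l v1l c t hp1,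
            rep_cons_neg k2l v2l c (rep k1l v1l (t)) n2,
            rep_cons_neg k3l v3l c (rep k2l v2l (rep k1l v1l (t))) n3,
            rep_cons_neg k4l v4l c (rep k3l v3l (rep k2l v2l (rep k1l v1l (t)))) n4,
            rep_cons_neg k5l v5l c (rep k4l v4l (rep k3l v3l (rep k2l v2l (rep k1l v1l (t))))) n5,
            rep_cons_neg k6l v6l c (rep k5l v5l (rep k4l v4l (rep k3l v3l (rep k2l v2l (rep k1l v1l (t)))))) n6]
        rw [ih t ht hbadt, scanB_char c t hp1 hp2 hp3 hp4 hp5 hp6]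

theorem port_eq_alt (text : String) (hpre : PySem.Str.isIn "algoritmachien" text = false) :
    basic_spell_correction_py text = basic_spell_correction_py_alt text := by
  apply String.toList_inj.mp
  have hbad : ¬ badl <:+: text.toList := by
    intro hb
    have : PySem.Str.isIn "algoritmachien" text = true :=
      (PySem.Str.isIn_iff_infix _ _).mpr
        (by rwa [show ("algoritmachien" : String).toList = badl from by decide])
    rw [this] at hpre; simp at hpre
  have hA : (basic_spell_correction_py text).toList =
      rep k6l v6l (rep k5l v5l (rep k4l v4l (rep k3l v3l (rep k2l v2l (rep k1l v1l text.toList))))) := by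
    simp only [basic_spell_correction_py, PySem.Str.toList_replace,
      show ("machien" : String).toList = k1l from by decide,
      show ("machine" : String).toList = v1l from by decide,
      show ("learing" : String).toList = k2l from by decide,
      show ("learning" : String).toList = v2l from by decide,
      show ("algoritm" : String).toList = k3l from by decide,
      show ("algorithm" : String).toList = v3l from by decide,
      show ("classifcation" : String).toList = k4l from by decide,
      show ("classification" : String).toList = v4l from by decide,
      show ("prediciton" : String).toList = k5l from by decide,
      show ("prediction" : String).toList = v5l from by decide,
      show ("anaylsis" : String).toList = k6l from by decide,
      show ("analysis" : String).toList = v6l from by decide]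
    rw [replace_eq_rep _ k1l v1l (by decide), replace_eq_rep _ k2l v2l (by decide),
        replace_eq_rep _ k3l v3l (by decide), replace_eq_rep _ k4l v4l (by decide),
        replace_eq_rep _ k5l v5l (by decide), replace_eq_rep _ k6l v6l (by decide)]
  rw [hA, show (basic_spell_correction_py_alt text).toList = scanB text.toList from by
    simp [basic_spell_correction_py_alt, String.toList_ofList]]
  exact main_eq text.toList.length text.toList le_rfl hbad

-- ===== VERDICT (by name: the statement is the Claim_ definition above) =====
theorem basic_spell_correction_py_spec : Claim_equal_basic_spell_correction_py := by
  intro text _ hpre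
  exact port_eq_alt text hpre
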